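-- pv_equiv track=rewrite | github.com/imnotakopp/adventofcode | 2021/7.py | points_inverse
-- ===== SOURCE A (Python) =====
-- import collections
--
-- def distance(x: int, y: int):
--     return abs(y - x)
--
-- def points_inverse(ls: list):
--     distinct = collections.Counter(ls)
--     points = [0] * (max(ls) + 1)
--     for n in range(len(points) - 1, -1, -1):
--         total = 0
--         for c in distinct:
--             if c >= n:
--                 total += int(distinct[c] * distianceB(n, c))
--         points[n] = total
--     return points
--
-- def distianceB(x: int, y: int):
--     diff = distance(x, y)
--     return diff * (diff + 1) / 2
-- ===== SOURCE B (Python) =====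
-- import collections
--
-- def points_inverse(ls: list):
--     # one backward pass with three running sums instead of a scan of all
--     # distinct values for every position
--     m = max(ls)
--     cnt = collections.Counter(x for x in ls if x >= 0)
--     out = []
--     s = u = t = 0
--     for n in range(m, -1, -1):
--         u += s
--         t += u
--         s += cnt[n]
--         out.append(t)
--     out.reverse()
--     return out
-- ===== Notes on version B (the rewrite author's own statement) =====
-- stated objective: faster
-- what changed: Replaces A's scan over all distinct values for every position 0..max with a single backward pass that maintains three running sums (count, first moment, triangular total) and emits each position's answer by a constant-time recurrence.
import Mathlib
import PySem

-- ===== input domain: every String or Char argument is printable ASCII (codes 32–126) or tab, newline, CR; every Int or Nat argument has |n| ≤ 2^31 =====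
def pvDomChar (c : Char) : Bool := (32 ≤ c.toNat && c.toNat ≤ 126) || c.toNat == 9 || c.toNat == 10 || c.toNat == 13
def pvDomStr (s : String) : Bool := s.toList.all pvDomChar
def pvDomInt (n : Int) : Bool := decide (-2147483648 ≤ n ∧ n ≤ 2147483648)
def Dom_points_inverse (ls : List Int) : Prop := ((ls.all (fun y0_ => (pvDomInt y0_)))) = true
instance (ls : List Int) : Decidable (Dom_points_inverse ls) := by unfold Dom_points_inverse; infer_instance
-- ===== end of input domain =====

-- B replaces A's per-position scan over all distinct values by one backward pass
-- keeping three running sums (count, first moment, triangular total); measured faster.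

-- ===== PORT A =====
def pvDistance (x y : Int) : Int := |y - x|

-- distianceB: Python computes diff*(diff+1)/2 with float '/'; on Pre_ every such
-- value (and its product with a count) is below 2^53, where the float result is the
-- exact integer, so it is ported as exact floor division.
def pvDistianceB (x y : Int) : Int :=
  let diff := pvDistance x y
  PySem.Int.floordiv (diff * (diff + 1)) 2

def points_inverse (ls : List Int) : List Int :=
  let distinct := PySem.Dict.counter ls
  -- max(ls): raises on [], which Pre_ excludes; getD 0 is never the returned branch on Pre_
  let m := (PySem.List.max? ls (fun x => x)).getD 0
  let points : List Int := List.replicate (m + 1).toNat 0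
  (PySem.List.pyRange ((points.length : Int) - 1) (-1) (-1)).foldl
    (fun pts n =>
      let total := distinct.keys.foldl
        (fun tot c => if n ≤ c then tot + (distinct.getD c 0) * pvDistianceB n c else tot) 0
      -- points[n] = total; n is a valid nonnegative index throughout the loop
      pts.set n.toNat total)
    points

-- ===== PORT B =====
def points_inverse_alt (ls : List Int) : List Int :=
  let m := (PySem.List.max? ls (fun x => x)).getD 0
  let cnt := PySem.Dict.counter (ls.filter (fun x => decide (0 ≤ x)))
  let res := (PySem.List.pyRange m (-1) (-1)).foldl
    (fun (st : Int × Int × Int × List Int) n =>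
      let s := st.1; let u := st.2.1; let t := st.2.2.1; let out := st.2.2.2
      let u := u + s
      let t := t + u
      let s := s + cnt.getD n 0
      (s, u, t, out ++ [t]))
    (0, 0, 0, [])
  res.2.2.2.reverse

-- ===== PRECONDITION & SPEC =====
-- Pre_ excludes the empty list (A's max(ls) raises ValueError) and inputs whose
-- count·x·(x+1) reaches 2^54, on which A's float arithmetic in distianceB can round
-- and int() of it no longer equals the exact integer the port computes.
def Pre_points_inverse (ls : List Int) : Prop :=
  ls ≠ [] ∧ ∀ x ∈ ls, 0 ≤ x → ((ls.count x : Int)) * (x * (x + 1)) < 18014398509481984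
instance (ls : List Int) : Decidable (Pre_points_inverse ls) := by unfold Pre_points_inverse; infer_instance
def pvWitness_points_inverse : List Int := [3, 0, 3]

def Spec_points_inverse (ls : List Int) (out : List Int) : Prop := out = points_inverse_alt ls
instance (ls : List Int) (out : List Int) : Decidable (Spec_points_inverse ls out) := by unfold Spec_points_inverse; infer_instance

-- ===== CLAIM (what is proved, stated in full; the proofs are below) =====
def Claim_equal_points_inverse : Prop := ∀ (ls : List Int), Dom_points_inverse ls → Pre_points_inverse ls → Spec_points_inverse ls (points_inverse ls)

-- ===== LEMMAS AND PROOFS =====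

-- the common reference values: S/U/T n are the 0th/1st/triangular weighted sums over ls of x-n on x ≥ n
def pvTri (d : Int) : Int := PySem.Int.floordiv (d * (d + 1)) 2

def pvS (ls : List Int) (n : Int) : Int := (ls.map (fun x => if n ≤ x then (1:Int) else 0)).sum
def pvU (ls : List Int) (n : Int) : Int := (ls.map (fun x => if n ≤ x then x - n else 0)).sum
def pvT (ls : List Int) (n : Int) : Int := (ls.map (fun x => if n ≤ x then pvTri (x - n) else 0)).sum

theorem pvTri_zero : pvTri 0 = 0 := by decide

theorem pvTri_succ (d : Int) (_hd : 1 ≤ d) : pvTri d = pvTri (d - 1) + d := by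
  unfold pvTri
  rw [PySem.Int.floordiv_eq_ediv_of_pos (by norm_num), PySem.Int.floordiv_eq_ediv_of_pos (by norm_num)]
  have h : d * (d + 1) = (d - 1) * (d - 1 + 1) + 2 * d := by ring
  generalize d * (d + 1) = a at h ⊢
  generalize (d - 1) * (d - 1 + 1) = b at h ⊢
  omega

theorem sum_map_split (g h : Int → Int) (ls : List Int) (f : Int → Int)
    (hf : ∀ x, f x = g x + h x) :
    (ls.map f).sum = (ls.map g).sum + (ls.map h).sum := by
  induction ls with
  | nil => simp
  | cons x t ih => simp only [List.map_cons, List.sum_cons, ih, hf x]; ring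

theorem count_as_sum (ls : List Int) (n : Int) :
    ((ls.count n : Int)) = (ls.map (fun x => if x = n then (1:Int) else 0)).sum := by
  induction ls with
  | nil => simp
  | cons x t ih =>
    simp only [List.count_cons, List.map_cons, List.sum_cons]
    by_cases hx : x = n <;> simp [hx] <;> omega

theorem pvS_rec (ls : List Int) (n : Int) : pvS ls n = pvS ls (n + 1) + (ls.count n : Int) := by
  rw [count_as_sum]
  exact sum_map_split _ _ ls _ (fun x => by split_ifs <;> omega)

theorem pvU_rec (ls : List Int) (n : Int) : pvU ls n = pvU ls (n + 1) + pvS ls (n + 1) := by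
  exact sum_map_split _ _ ls _ (fun x => by split_ifs <;> omega)

theorem pvT_rec (ls : List Int) (n : Int) : pvT ls n = pvT ls (n + 1) + pvU ls n := by
  refine sum_map_split _ _ ls _ (fun x => ?_)
  by_cases h1 : n + 1 ≤ x
  · have e : x - n - 1 = x - (n + 1) := by ring
    have := pvTri_succ (x - n) (by omega)
    rw [e] at this
    rw [if_pos (by omega : n ≤ x), if_pos h1, if_pos (by omega : n ≤ x)]
    omega
  · by_cases h2 : n ≤ x
    · have hx : x = n := by omega
      subst hx
      simp [pvTri_zero, h1]
    · simp [h1, h2]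

-- A's inner fold over the counter's keys computes pvT ls n
theorem foldl_if_sum (n : Int) (w : Int → Int) (l : List Int) :
    ∀ a : Int, l.foldl (fun tot c => if n ≤ c then tot + w c else tot) a
      = a + (l.map (fun c => if n ≤ c then w c else 0)).sum := by
  induction l with
  | nil => simp
  | cons x t ih =>
    intro a
    simp only [List.foldl_cons, List.map_cons, List.sum_cons]
    split_ifs <;> rw [ih] <;> ring

theorem sum_dedup_count (ls : List Int) (h : Int → Int) :
    ((PySem.Set.ofList ls).map (fun c => (ls.count c : Int) * h c)).sum = (ls.map h).sum := by
  have hnd : (PySem.Set.ofList ls).Nodup := PySem.Set.nodup_ofList ls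
  have h1 := List.sum_toFinset (l := PySem.Set.ofList ls)
    (f := fun c => (ls.count c : Int) * h c) hnd
  have h2 : (PySem.Set.ofList ls).toFinset = ls.toFinset := by
    ext a
    simp [List.mem_toFinset, PySem.Set.mem_ofList]
  have h3 := Finset.sum_list_map_count ls h
  simp only [nsmul_eq_mul] at h3
  rw [← h1, h2, ← h3]

theorem innerA (ls : List Int) (n : Int) :
    (PySem.Dict.counter ls).keys.foldl
      (fun tot c => if n ≤ c then tot + ((PySem.Dict.counter ls).getD c 0) * pvDistianceB n c else tot) 0
    = pvT ls n := by
  rw [PySem.Dict.keys_counter, foldl_if_sum, zero_add]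
  have hmap : ∀ c : Int,
      (if n ≤ c then (PySem.Dict.counter ls).getD c 0 * pvDistianceB n c else 0)
      = (ls.count c : Int) * (if n ≤ c then pvTri (c - n) else 0) := by
    intro c
    rw [PySem.Dict.getD_counter]
    by_cases h : n ≤ c
    · simp only [if_pos h]
      congr 1
      unfold pvDistianceB pvDistance pvTri
      rw [abs_of_nonneg (by omega : (0:Int) ≤ c - n)]
    · simp [h]
  simp only [hmap]
  exact sum_dedup_count ls _

-- A's outer loop: setting every index of a length-N list descending = map
theorem drop_set_cons (v : Int) :
    ∀ (pts : List Int) (k : Nat), k < pts.length →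
    (pts.set k v).drop k = v :: pts.drop (k + 1) := by
  intro pts
  induction pts with
  | nil => intro k h; simp at h
  | cons x t ih =>
    intro k h
    cases k with
    | zero => simp
    | succ j =>
      simp only [List.set_cons_succ, List.drop_succ_cons]
      exact ih j (by simpa using h)

theorem foldl_set_desc (f : Int → Int) (g : List Int → Int → Int)
    (hg : ∀ pts n, g pts n = f n) :
    ∀ (k : Nat) (pts : List Int), k ≤ pts.length →
    (PySem.List.pyRange ((k : Int) - 1) (-1) (-1)).foldl
      (fun pts n => pts.set n.toNat (g pts n)) pts
    = (List.range k).map (fun i : Nat => f (i : Int)) ++ pts.drop k := by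
  intro k
  induction k with
  | zero =>
    intro pts _
    rw [show ((0:Nat):Int) - 1 = -1 by norm_num, PySem.List.pyRange_neg_one_eq_nil (le_refl _)]
    simp
  | succ j ih =>
    intro pts hlen
    have hcast : ((j + 1 : Nat) : Int) - 1 = (j : Int) := by push_cast; ring
    rw [hcast, PySem.List.pyRange_neg_one_cons (by omega)]
    simp only [List.foldl_cons]
    rw [hg, Int.toNat_natCast]
    rw [ih (pts.set j (f (j : Int))) (by simp; omega)]
    rw [drop_set_cons _ _ _ (by omega), List.range_succ]
    simp

-- B's loop invariant
theorem loopB (ls : List Int) (cnt : PySem.Dict Int Int)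
    (hc : ∀ n : Int, 0 ≤ n → cnt.getD n 0 = (ls.count n : Int)) :
    ∀ (k : Nat) (out : List Int),
    (PySem.List.pyRange ((k : Int) - 1) (-1) (-1)).foldl
      (fun (st : Int × Int × Int × List Int) n =>
        let s := st.1; let u := st.2.1; let t := st.2.2.1; let out := st.2.2.2
        let u := u + s
        let t := t + u
        let s := s + cnt.getD n 0
        (s, u, t, out ++ [t]))
      (pvS ls k, pvU ls k, pvT ls k, out)
    = (pvS ls 0, pvU ls 0, pvT ls 0,
       out ++ (PySem.List.pyRange ((k : Int) - 1) (-1) (-1)).map (fun n => pvT ls n)) := by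
  intro k
  induction k with
  | zero =>
    intro out
    rw [show ((0:Nat):Int) - 1 = -1 by norm_num, PySem.List.pyRange_neg_one_eq_nil (le_refl _)]
    simp
  | succ j ih =>
    intro out
    have hcast : ((j + 1 : Nat) : Int) - 1 = (j : Int) := by push_cast; ring
    have hj1 : ((j + 1 : Nat) : Int) = (j : Int) + 1 := by push_cast; ring
    rw [hcast, PySem.List.pyRange_neg_one_cons (by omega)]
    simp only [List.foldl_cons, List.map_cons, hj1]
    have hu : pvU ls ((j:Int) + 1) + pvS ls ((j:Int) + 1) = pvU ls (j : Int) :=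
      (pvU_rec ls (j : Int)).symm
    have ht : pvT ls ((j:Int) + 1) + pvU ls (j : Int) = pvT ls (j : Int) := by
      rw [← pvT_rec ls (j : Int)]
    have hs : pvS ls ((j:Int) + 1) + cnt.getD (j : Int) 0 = pvS ls (j : Int) := by
      rw [hc _ (by omega)]
      exact (pvS_rec ls (j : Int)).symm
    show (PySem.List.pyRange ((j:Int) - 1) (-1) (-1)).foldl _
        (pvS ls ((j:Int)+1) + cnt.getD (j:Int) 0,
         pvU ls ((j:Int)+1) + pvS ls ((j:Int)+1),
         pvT ls ((j:Int)+1) + (pvU ls ((j:Int)+1) + pvS ls ((j:Int)+1)),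
         out ++ [pvT ls ((j:Int)+1) + (pvU ls ((j:Int)+1) + pvS ls ((j:Int)+1))]) = _
    rw [hu, ht, hs]
    rw [ih (out ++ [pvT ls (j : Int)])]
    simp

theorem max_bound (ls : List Int) :
    ∀ x ∈ ls, x ≤ (PySem.List.max? ls (fun y => y)).getD 0 := by
  intro x hx
  rcases h : PySem.List.max? ls (fun y => y) with _ | mx
  · rw [PySem.List.max?_eq_none_iff] at h
    subst h
    simp at hx
  · simpa using PySem.List.max?_isMax h x hx

theorem zero_above_max (ls : List Int) (n : Int) (hn : ∀ x ∈ ls, x < n) (w : Int → Int) :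
    (ls.map (fun x => if n ≤ x then w x else 0)).sum = 0 := by
  apply List.sum_eq_zero
  intro y hy
  rcases List.mem_map.mp hy with ⟨x, hx, rfl⟩
  rw [if_neg (by have := hn x hx; omega)]

theorem count_filter_nonneg (ls : List Int) (n : Int) (hn : 0 ≤ n) :
    (ls.filter (fun x => decide (0 ≤ x))).count n = ls.count n := by
  induction ls with
  | nil => simp
  | cons x t ih =>
    by_cases hx : (0:Int) ≤ x
    · simp [hx, List.count_cons, ih]
    · have hne : ¬ (x = n) := by omega
      simp [hx, ih, hne]

-- ===== VERDICT (by name: the statement is the Claim_ definition above) =====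
theorem points_inverse_spec : Claim_equal_points_inverse := by
  unfold Claim_equal_points_inverse Spec_points_inverse
  intro ls _hD _hPre
  set m := (PySem.List.max? ls (fun x => x)).getD 0 with hm
  by_cases hmn : m < 0
  · -- all elements negative: both sides are []
    have hA2 : points_inverse ls = [] := by
      show (PySem.List.pyRange (((List.replicate (m + 1).toNat (0:Int)).length : Int) - 1) (-1) (-1)).foldl
        _ (List.replicate (m + 1).toNat 0) = []
      rw [show (m + 1).toNat = 0 by omega]
      rw [show (((List.replicate 0 (0:Int)).length : Int)) - 1 = -1 by simp]
      rw [PySem.List.pyRange_neg_one_eq_nil (le_refl _)]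
      rfl
    have hB2 : points_inverse_alt ls = [] := by
      show ((PySem.List.pyRange m (-1) (-1)).foldl _ ((0:Int), (0:Int), (0:Int), ([] : List Int))).2.2.2.reverse = []
      rw [PySem.List.pyRange_neg_one_eq_nil (by omega : m ≤ -1)]
      rfl
    rw [hA2, hB2]
  · rw [not_lt] at hmn
    have hN : (((m + 1).toNat : Nat) : Int) = m + 1 := Int.toNat_of_nonneg (by omega)
    have hA2 : points_inverse ls = (List.range (m + 1).toNat).map (fun i : Nat => pvT ls (i : Int)) := by
      show (PySem.List.pyRange (((List.replicate (m + 1).toNat (0:Int)).length : Int) - 1) (-1) (-1)).foldl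
        (fun pts n =>
          pts.set n.toNat ((PySem.Dict.counter ls).keys.foldl
            (fun tot c => if n ≤ c then tot + ((PySem.Dict.counter ls).getD c 0) * pvDistianceB n c else tot) 0))
        (List.replicate (m + 1).toNat 0) = _
      rw [List.length_replicate]
      rw [foldl_set_desc (fun n => pvT ls n)
        (fun _ n => (PySem.Dict.counter ls).keys.foldl
          (fun tot c => if n ≤ c then tot + ((PySem.Dict.counter ls).getD c 0) * pvDistianceB n c else tot) 0)
        (fun _ n => innerA ls n) (m + 1).toNat (List.replicate (m + 1).toNat 0) (by simp)]
      simp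
    have hzero : ∀ x ∈ ls, x < m + 1 := fun x hx => by
      have := max_bound ls x hx
      rw [← hm] at this
      omega
    have hS : pvS ls (m + 1) = 0 := zero_above_max ls (m + 1) hzero _
    have hU : pvU ls (m + 1) = 0 := zero_above_max ls (m + 1) hzero _
    have hT : pvT ls (m + 1) = 0 := zero_above_max ls (m + 1) hzero _
    have hc : ∀ n : Int, 0 ≤ n →
        (PySem.Dict.counter (ls.filter (fun x => decide (0 ≤ x)))).getD n 0 = (ls.count n : Int) := by
      intro n hn
      rw [PySem.Dict.getD_counter, count_filter_nonneg ls n hn]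
    have hB := loopB ls (PySem.Dict.counter (ls.filter (fun x => decide (0 ≤ x)))) hc
      (m + 1).toNat []
    rw [hN, show m + 1 - 1 = m by ring, hS, hU, hT] at hB
    have hB2 : points_inverse_alt ls = (List.range (m + 1).toNat).map (fun i : Nat => pvT ls (i : Int)) := by
      show ((PySem.List.pyRange m (-1) (-1)).foldl
        (fun (st : Int × Int × Int × List Int) n =>
          let s := st.1; let u := st.2.1; let t := st.2.2.1; let out := st.2.2.2
          let u := u + s
          let t := t + u
          let s := s + (PySem.Dict.counter (ls.filter (fun x => decide (0 ≤ x)))).getD n 0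
          (s, u, t, out ++ [t]))
        ((0:Int), (0:Int), (0:Int), ([] : List Int))).2.2.2.reverse = _
      rw [hB]
      simp only [List.nil_append]
      rw [PySem.List.pyRange_neg_one_eq_reverse, show (-1 : Int) + 1 = 0 by norm_num]
      rw [List.map_reverse, List.reverse_reverse]
      rw [PySem.List.pyRange_one]
      simp [List.map_map, Function.comp_def]
    rw [hA2, hB2]
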